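-- pv_equiv track=rewrite | github.com/NLP-course-project-2023/BiDAF | src/data_preparation/preprocessing.py | find_closest_lower_number
-- ===== SOURCE A (Python) =====
-- def find_closest_lower_number(num, lst):
--     left, right = 0, len(lst) - 1
--     closest = None
--     while left <= right:
--         mid = (left + right) // 2
--         if lst[mid] < num:
--             closest = lst[mid]
--             left = mid + 1
--         else:
--             right = mid - 1
--     return closest,left
-- ===== SOURCE B (Python) =====
-- def _final_left(num, lst, left, size):
--     # final value of the search's left bound on the interval [left, left+size-1]
--     if size == 0:
--         return left
--     mid = left + (size - 1) // 2
--     if lst[mid] < num: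
--         return _final_left(num, lst, mid + 1, left + size - 1 - mid)
--     return _final_left(num, lst, left, mid - left)
--
--
-- def find_closest_lower_number(num, lst):
--     m = _final_left(num, lst, 0, len(lst))
--     if m == 0:
--         return None, 0
--     return lst[m - 1], m
-- ===== Notes on version B (the rewrite author's own statement) =====
-- stated objective: alternative
-- what changed: B drops A's (closest, left) loop state entirely: a recursive helper over (offset, interval-size) computes only the final left bound, and both outputs are reconstructed afterwards (left==0 means no element of the search path was below num, otherwise closest is lst[left-1]).
import Mathlib
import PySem

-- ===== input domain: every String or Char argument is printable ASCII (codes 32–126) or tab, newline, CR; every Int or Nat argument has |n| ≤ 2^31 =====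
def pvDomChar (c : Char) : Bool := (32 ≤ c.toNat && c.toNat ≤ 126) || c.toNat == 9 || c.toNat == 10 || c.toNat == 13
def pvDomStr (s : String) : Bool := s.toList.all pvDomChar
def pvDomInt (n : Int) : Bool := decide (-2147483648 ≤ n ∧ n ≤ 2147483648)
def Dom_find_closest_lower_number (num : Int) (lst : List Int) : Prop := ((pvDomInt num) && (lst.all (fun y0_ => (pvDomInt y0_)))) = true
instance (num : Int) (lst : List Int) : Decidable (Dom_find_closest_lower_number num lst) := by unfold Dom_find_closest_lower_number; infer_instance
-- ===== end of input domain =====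

-- B drops A's (closest, left) loop state: a Nat recursion over (offset, interval size)
-- computes only the final left bound, and both outputs are reconstructed from it at the end
-- (objective: alternative decomposition).

-- ===== PORT A =====
-- while left <= right: mid = (left+right)//2; branch on lst[mid] < num.
-- The loop is transcribed as structural recursion on a fuel that bounds the iteration count;
-- the interval [left, right] shrinks by at least one per iteration, so fuel = len(lst) + 1 at
-- the call site is never exhausted.
def goA (num : Int) (lst : List Int) (fuel : Nat) (left right : Int) (closest : Option Int) : Option Int × Int :=
  match fuel with
  | 0 => (closest, left)
  | fuel + 1 =>
    if left ≤ right then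
      match PySem.List.pyGet? lst (PySem.Int.floordiv (left + right) 2) with
      | some v =>
        if v < num then goA num lst fuel (PySem.Int.floordiv (left + right) 2 + 1) right (some v)
        else goA num lst fuel left (PySem.Int.floordiv (left + right) 2 - 1) closest
      | none => (closest, left)  -- IndexError; never reached from the call below (0 ≤ left, right < len)
    else (closest, left)

def find_closest_lower_number (num : Int) (lst : List Int) : Option Int × Int :=
  goA num lst (lst.length + 1) 0 ((lst.length : Int) - 1) none

-- ===== PORT B =====
-- _final_left from Source B: recursion on the interval size (a Nat, so no fuel is needed)
def finalLeft (num : Int) (lst : List Int) (left : Nat) (size : Nat) : Nat :=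
  if _hs : size = 0 then left
  else
    match PySem.List.pyGet? lst ((left + (size - 1) / 2 : Nat) : Int) with
    | some v =>
      if v < num then finalLeft num lst (left + (size - 1) / 2 + 1) (left + size - 1 - (left + (size - 1) / 2))
      else finalLeft num lst left ((left + (size - 1) / 2) - left)
    | none => left  -- IndexError in Python; unreachable from the top-level call below
termination_by size
decreasing_by all_goals omega

def find_closest_lower_number_alt (num : Int) (lst : List Int) : Option Int × Int :=
  let m := finalLeft num lst 0 lst.length
  if m = 0 then (none, 0)
  else match PySem.List.pyGet? lst ((m : Int) - 1) with
    | some v => (some v, (m : Int))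
    | none => (none, (m : Int))  -- IndexError in Python; unreachable from this call

-- ===== PRECONDITION & SPEC =====
def Spec_find_closest_lower_number (num : Int) (lst : List Int) (out : Option Int × Int) : Prop := out = find_closest_lower_number_alt num lst
instance (num : Int) (lst : List Int) (out : Option Int × Int) : Decidable (Spec_find_closest_lower_number num lst out) := by unfold Spec_find_closest_lower_number; infer_instance

-- ===== CLAIM =====
def Claim_equal_find_closest_lower_number : Prop := ∀ (num : Int) (lst : List Int), Dom_find_closest_lower_number num lst → Spec_find_closest_lower_number num lst (find_closest_lower_number num lst)

-- ===== LEMMAS AND PROOFS =====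

-- the final left bound never drops below the initial one
lemma finalLeft_ge (num : Int) (lst : List Int) : ∀ (size left : Nat), left ≤ finalLeft num lst left size := by
  intro size
  induction size using Nat.strong_induction_on with
  | _ size ih =>
    intro left
    rw [finalLeft]
    by_cases hs : size = 0
    · simp [hs]
    · rw [dif_neg hs]
      cases hg : PySem.List.pyGet? lst ((left + (size - 1) / 2 : Nat) : Int) with
      | none => exact le_refl left
      | some v =>
        simp only
        by_cases hv : v < num
        · simp only [hv, if_true]
          have := ih (left + size - 1 - (left + (size - 1) / 2)) (by omega) (left + (size - 1) / 2 + 1)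
          omega
        · simp only [hv, if_false]
          exact ih ((left + (size - 1) / 2) - left) (by omega) left

-- A's loop computed from B's final-left recursion
lemma goA_eq (num : Int) (lst : List Int) : ∀ (fuel s l : Nat) (closest : Option Int),
    s ≤ fuel → l + s ≤ lst.length →
    goA num lst fuel (l : Int) ((l : Int) + (s : Int) - 1) closest =
      (if finalLeft num lst l s = l then (closest, (l : Int))
       else (PySem.List.pyGet? lst ((finalLeft num lst l s : Int) - 1), (finalLeft num lst l s : Int))) := by
  intro fuel
  induction fuel with
  | zero =>
    intro s l closest hsf hlen
    have hs0 : s = 0 := by omega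
    subst hs0
    rw [goA, finalLeft]
    simp
  | succ fuel ih =>
    intro s l closest hsf hlen
    match s with
    | 0 =>
      rw [goA, if_neg (by push_cast; omega), finalLeft]
      simp
    | t + 1 =>
      have hle : (l : Int) ≤ (l : Int) + ((t : Int) + 1) - 1 := by omega
      have hmid : PySem.Int.floordiv ((l : Int) + ((l : Int) + ((t + 1 : Nat) : Int) - 1)) 2
          = ((l + t / 2 : Nat) : Int) := by
        rw [PySem.Int.floordiv_eq_ediv_of_pos (by norm_num)]
        push_cast
        omega
      conv_lhs => rw [goA]
      rw [if_pos (by push_cast at hle ⊢; omega), hmid, PySem.List.pyGet?_natCast]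
      have hidx : l + t / 2 < lst.length := by omega
      rw [List.getElem?_eq_getElem hidx]
      simp only
      conv_rhs => rw [finalLeft]
      rw [dif_neg (by omega : ¬ t + 1 = 0)]
      have hm : (t + 1 - 1) / 2 = t / 2 := by omega
      rw [hm, PySem.List.pyGet?_natCast, List.getElem?_eq_getElem hidx]
      simp only
      by_cases hv : lst[l + t / 2] < num
      · simp only [hv, if_true]
        -- right step: new interval [mid+1, l+t], size t - t/2
        have h1 : ((l + t / 2 : Nat) : Int) + 1 = ((l + t / 2 + 1 : Nat) : Int) := by push_cast; ring
        have h2 : (l : Int) + ((t + 1 : Nat) : Int) - 1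
            = ((l + t / 2 + 1 : Nat) : Int) + ((t - t / 2 : Nat) : Int) - 1 := by push_cast; omega
        rw [h1, h2, ih (t - t / 2) (l + t / 2 + 1) (some lst[l + t / 2]) (by omega) (by omega)]
        have h3 : l + (t + 1) - 1 - (l + t / 2) = t - t / 2 := by omega
        rw [h3]
        have hge := finalLeft_ge num lst (t - t / 2) (l + t / 2 + 1)
        set L := finalLeft num lst (l + t / 2 + 1) (t - t / 2) with hL
        by_cases hL1 : L = l + t / 2 + 1
        · rw [if_pos hL1, if_neg (by omega : ¬ L = l)]
          rw [hL1]
          have : ((l + t / 2 + 1 : Nat) : Int) - 1 = ((l + t / 2 : Nat) : Int) := by push_cast; ring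
          rw [this, PySem.List.pyGet?_natCast, List.getElem?_eq_getElem hidx]
        · rw [if_neg hL1, if_neg (by omega : ¬ L = l)]
      · simp only [hv, if_false]
        -- left step: new interval [l, mid-1], size t/2
        have h2 : ((l + t / 2 : Nat) : Int) - 1 = (l : Int) + ((t / 2 : Nat) : Int) - 1 := by push_cast; ring
        rw [h2, ih (t / 2) l closest (by omega) (by omega)]
        have h3 : l + t / 2 - l = t / 2 := by omega
        rw [h3]

-- ===== VERDICT =====
theorem find_closest_lower_number_spec : Claim_equal_find_closest_lower_number := by
  intro num lst _
  unfold Spec_find_closest_lower_number find_closest_lower_number find_closest_lower_number_alt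
  have h := goA_eq num lst (lst.length + 1) lst.length 0 none (by omega) (by omega)
  norm_num at h
  rw [h]
  by_cases h0 : finalLeft num lst 0 lst.length = 0
  · simp [h0]
  · simp only [h0, if_false]
    cases PySem.List.pyGet? lst ((finalLeft num lst 0 lst.length : Int) - 1) <;> simp
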